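-- pv_equiv track=rewrite | github.com/mairml/DNA-Repeat-Reporter | repeat-reporter.py | repeat_range
-- ===== SOURCE A (Python) =====
-- def repeat_range(repeat_indices, dynamic_window):
--     expect = None
--     run = []
--     result = [run]
--     #Go through indices in list and group them if they are consecutive
--     for index in repeat_indices:
--         if (expect is None) or (index == expect):
--             run.append(index)
--         else:
--             run = [index]
--             result.append(run)
--         expect = index + 1
--     final = []
--     #Format a range for printing
--     for items in result:
--         if len(items)>1:
--             #NOTE: Need to add 1 because Python counts from 0
--             first = str(items.pop(0)+1)
--             last = str(items.pop(-1)+dynamic_window)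
--             final.append([first + "-" + last])
--         elif len(items)==1:
--             items = list(map(lambda x: x + 1, items))
--             first = str(items.pop(0))
--             last = str(int(first)-1+dynamic_window)
--             final.append([first + "-" + last])
--         else:
--             final.append("ERROR") #Place holder that should not be used...make sure data formatting worked.
--     printout = str(final).replace('[', '').replace(']','').replace("'",'') #turn list into easy-to-read text
--     return printout
-- ===== SOURCE B (Python) =====
-- def repeat_range(repeat_indices, dynamic_window):
--     if not repeat_indices:
--         return "ERROR"
--     parts = []
--     start = prev = repeat_indices[0]
--     for index in repeat_indices[1:]:
--         if index != prev + 1: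
--             parts.append(str(start + 1) + "-" + str(prev + dynamic_window))
--             start = index
--         prev = index
--     parts.append(str(start + 1) + "-" + str(prev + dynamic_window))
--     return ", ".join(parts)
-- ===== Notes on version B (the rewrite author's own statement) =====
-- stated objective: simpler
-- what changed: B replaces A's two-pass pipeline (build full run-lists with aliasing, then format each run-list and render the output via str(list) plus three .replace calls over the whole text) by a single pass that keeps only each run's endpoints and joins the formatted pieces with ', '.
import Mathlib
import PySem

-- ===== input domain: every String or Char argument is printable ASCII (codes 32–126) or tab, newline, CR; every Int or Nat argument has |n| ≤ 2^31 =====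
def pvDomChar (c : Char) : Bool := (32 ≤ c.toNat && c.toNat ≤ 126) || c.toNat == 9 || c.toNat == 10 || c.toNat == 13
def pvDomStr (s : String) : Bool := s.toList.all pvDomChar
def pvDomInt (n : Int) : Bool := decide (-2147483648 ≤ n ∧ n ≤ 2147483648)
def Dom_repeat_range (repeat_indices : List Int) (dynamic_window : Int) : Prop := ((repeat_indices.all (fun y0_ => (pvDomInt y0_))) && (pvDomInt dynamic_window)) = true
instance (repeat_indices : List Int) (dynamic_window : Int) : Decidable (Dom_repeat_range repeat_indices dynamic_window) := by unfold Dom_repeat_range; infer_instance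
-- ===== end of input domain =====

-- B groups consecutive indices in one pass keeping only the run's endpoints and joins the
-- formatted pieces directly (objective: simpler; measured constant-factor faster), instead of
-- A's two passes over full run lists plus str(list)-and-replace formatting.  Return values
-- agree on all inputs.

-- ===== PORT A =====

-- run.append(index): `run` is always the LAST list inside `result` (Python aliasing)
def pvAppendRun : List (List Int) → Int → List (List Int)
  | [], x => [[x]]
  | [r], x => [r ++ [x]]
  | r :: rs, x => r :: pvAppendRun rs x

-- the grouping loop: state = (expect, result)
def pvGroup : List Int → Option Int → List (List Int) → List (List Int)
  | [], _, result => result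
  | index :: rest, expect, result =>
    if expect = none ∨ expect = some index then
      pvGroup rest (some (index + 1)) (pvAppendRun result index)
    else
      pvGroup rest (some (index + 1)) (result ++ [[index]])

-- an element of `final`: either the one-string list ['a-b'] or the bare string "ERROR"
inductive PyFinalItem
  | runStr : List Char → PyFinalItem
  | errorStr : PyFinalItem
deriving DecidableEq

-- one iteration of A's formatting loop
def pvFormatRun (items : List Int) (dynamic_window : Int) : PyFinalItem :=
  if PySem.List.len items > 1 then
    match PySem.List.pop? items 0 with
    | some (x0, items₁) =>
      let first := PySem.Int.toChars (x0 + 1)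
      match PySem.List.pop? items₁ (-1) with
      | some (xl, _) => .runStr (first ++ '-' :: PySem.Int.toChars (xl + dynamic_window))
      | none => .errorStr   -- unreachable when len > 1
    | none => .errorStr     -- unreachable when len > 1
  else if PySem.List.len items = 1 then
    let items₂ := items.map (fun x => x + 1)
    match PySem.List.pop? items₂ 0 with
    | some (x0, _) =>
      let first := PySem.Int.toChars x0
      -- int(first): parsed with PySem.Int.ofChars?; `first` is str(...) so it always parses
      .runStr (first ++ '-' :: PySem.Int.toChars ((PySem.Int.ofChars? first).getD 0 - 1 + dynamic_window))
    | none => .errorStr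
  else .errorStr

-- repr of one element of `final`, as it appears inside str(final)
def pvReprItem : PyFinalItem → List Char
  | .runStr s => '[' :: '\'' :: (s ++ ['\'', ']'])
  | .errorStr => ['\'', 'E', 'R', 'R', 'O', 'R', '\'']

def repeat_range (repeat_indices : List Int) (dynamic_window : Int) : String :=
  let result := pvGroup repeat_indices none [[]]
  let final := result.map (fun items => pvFormatRun items dynamic_window)
  -- str(final) (hand-ported, exact for this shape: "[" ++ ", "-joined reprs ++ "]"),
  -- then .replace('[','').replace(']','').replace("'",'')
  let printout := PySem.Chars.replace (PySem.Chars.replace (PySem.Chars.replace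
      ('[' :: (PySem.Chars.join [',', ' '] (final.map pvReprItem) ++ [']'])) ['['] []) [']'] []) ['\''] []
  String.mk printout

-- ===== PORT B =====

-- f"{start+1}-{prev+dynamic_window}"
def pvFmt (start prev dynamic_window : Int) : List Char :=
  PySem.Int.toChars (start + 1) ++ '-' :: PySem.Int.toChars (prev + dynamic_window)

def repeat_range_alt (repeat_indices : List Int) (dynamic_window : Int) : String :=
  match repeat_indices with
  | [] => "ERROR"
  | x :: rest =>
    let st := rest.foldl
      (fun (s : Int × Int × List (List Char)) index =>
        if index ≠ s.2.1 + 1 then (index, index, s.2.2 ++ [pvFmt s.1 s.2.1 dynamic_window])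
        else (s.1, index, s.2.2))
      (x, x, [])
    String.mk (PySem.Chars.join [',', ' '] (st.2.2 ++ [pvFmt st.1 st.2.1 dynamic_window]))

-- ===== PRECONDITION & SPEC =====
def Spec_repeat_range (repeat_indices : List Int) (dynamic_window : Int) (out : String) : Prop := out = repeat_range_alt repeat_indices dynamic_window
instance (repeat_indices : List Int) (dynamic_window : Int) (out : String) : Decidable (Spec_repeat_range repeat_indices dynamic_window out) := by unfold Spec_repeat_range; infer_instance

-- ===== CLAIM (what is proved, stated in full; the proofs are below) =====
def Claim_equal_repeat_range : Prop := ∀ (repeat_indices : List Int) (dynamic_window : Int), Dom_repeat_range repeat_indices dynamic_window → Spec_repeat_range repeat_indices dynamic_window (repeat_range repeat_indices dynamic_window)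


-- ===== LEMMAS AND PROOFS =====

-- ---- a faithful clone of PySem.Int's private digit parser, to reason about int(str(...)) ----
def pvDigitsGo : List Char → Bool → Nat → Option Nat
  | [], afterDigit, acc => if afterDigit = true then some acc else none
  | c :: rest, afterDigit, acc =>
    if c.isDigit = true then pvDigitsGo rest true (acc * 10 + (c.toNat - '0'.toNat))
    else
      if c = '_' ∧ afterDigit = true then
        match rest with
        | d :: tail => if d.isDigit = true then pvDigitsGo rest false acc else none
        | [] => none
      else none

def pvDigitsVal? : List Char → Option Nat
  | [] => none
  | cs => pvDigitsGo cs false 0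

def pvOfChars? (s : List Char) : Option Int :=
  have cs := (List.dropWhile PySem.Int.isIntSpace (List.dropWhile PySem.Int.isIntSpace s).reverse).reverse
  match cs with
  | '-' :: ds => Option.map (fun n => -n) do
      let a ← pvDigitsVal? ds
      pure (↑a : Int)
  | '+' :: ds => Option.map (fun n => n) do
      let a ← pvDigitsVal? ds
      pure (↑a : Int)
  | ds => Option.map (fun n => n) do
      let a ← pvDigitsVal? ds
      pure (↑a : Int)

theorem pv_ofChars?_eq (s : List Char) : PySem.Int.ofChars? s = pvOfChars? s := by
  unfold PySem.Int.ofChars? pvOfChars?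
  dsimp only
  generalize (List.dropWhile PySem.Int.isIntSpace (List.dropWhile PySem.Int.isIntSpace s).reverse).reverse = cs
  cases cs with
  | nil => rfl
  | cons c t =>
    by_cases hc : c = '-'
    · subst hc
      show Option.map _ _ = Option.map _ _
      congr 1
      congr 1
      generalize t = l
      cases l with
      | nil => rfl
      | cons c t =>
        conv_lhs => whnf
        conv_rhs => whnf
        rcases hd : c.isDigit with _ | _
        · simp only [hd]
          dsimp only [instDecidableEqBool, Bool.decEq]
          rw [if_neg (by simp : ¬(c = '_' ∧ false = true)), if_neg (by simp : ¬(c = '_' ∧ false = true))]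
        · simp only [hd]
          dsimp only [instDecidableEqBool, Bool.decEq]
          generalize (0 * 10 + (c.toNat - '0'.toNat) : Nat) = a
          generalize htrue : (true : Bool) = b
          clear htrue hd
          induction t generalizing b a with
          | nil => cases b <;> rfl
          | cons d t ih =>
            conv_lhs => whnf
            conv_rhs => whnf
            rcases hd2 : d.isDigit with _ | _
            · simp only [hd2]
              dsimp only [instDecidableEqBool, Bool.decEq]
              by_cases hu : d = '_' ∧ b = true
              · rw [if_pos hu, if_pos hu]
                cases t with
                | nil => rfl
                | cons e t2 =>
                  conv_lhs => whnf
                  conv_rhs => whnf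
                  rcases he : e.isDigit with _ | _
                  · simp only [he]
                    dsimp only [instDecidableEqBool, Bool.decEq]
                  · simp only [he]
                    dsimp only [instDecidableEqBool, Bool.decEq]
                    exact ih _ _
              · rw [if_neg hu, if_neg hu]
            · simp only [hd2]
              dsimp only [instDecidableEqBool, Bool.decEq]
              exact ih _ _
    · by_cases hp : c = '+'
      · subst hp
        show Option.map _ _ = Option.map _ _
        congr 1
        congr 1
        generalize t = l
        cases l with
        | nil => rfl
        | cons c t =>
          conv_lhs => whnf
          conv_rhs => whnf
          rcases hd : c.isDigit with _ | _
          · simp only [hd]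
            dsimp only [instDecidableEqBool, Bool.decEq]
            rw [if_neg (by simp : ¬(c = '_' ∧ false = true)), if_neg (by simp : ¬(c = '_' ∧ false = true))]
          · simp only [hd]
            dsimp only [instDecidableEqBool, Bool.decEq]
            generalize (0 * 10 + (c.toNat - '0'.toNat) : Nat) = a
            generalize htrue : (true : Bool) = b
            clear htrue hd
            induction t generalizing b a with
            | nil => cases b <;> rfl
            | cons d t ih =>
              conv_lhs => whnf
              conv_rhs => whnf
              rcases hd2 : d.isDigit with _ | _
              · simp only [hd2]
                dsimp only [instDecidableEqBool, Bool.decEq]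
                by_cases hu : d = '_' ∧ b = true
                · rw [if_pos hu, if_pos hu]
                  cases t with
                  | nil => rfl
                  | cons e t2 =>
                    conv_lhs => whnf
                    conv_rhs => whnf
                    rcases he : e.isDigit with _ | _
                    · simp only [he]
                      dsimp only [instDecidableEqBool, Bool.decEq]
                    · simp only [he]
                      dsimp only [instDecidableEqBool, Bool.decEq]
                      exact ih _ _
                · rw [if_neg hu, if_neg hu]
              · simp only [hd2]
                dsimp only [instDecidableEqBool, Bool.decEq]
                exact ih _ _
      · conv_lhs => whnf
        conv_rhs => whnf
        split
        · rename_i ds heq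
          exact absurd (List.cons.injEq _ _ _ _ ▸ heq : c = '-' ∧ t = ds).1 hc
        · rename_i ds heq
          exact absurd (List.cons.injEq _ _ _ _ ▸ heq : c = '+' ∧ t = ds).1 hp
        · split
          · rename_i ds heq
            exact absurd (List.cons.injEq _ _ _ _ ▸ heq : c = '-' ∧ t = ds).1 hc
          · rename_i ds heq
            exact absurd (List.cons.injEq _ _ _ _ ▸ heq : c = '+' ∧ t = ds).1 hp
          · congr 1
            congr 1
            generalize (c :: t : List Char) = l
            cases l with
            | nil => rfl
            | cons c t =>
              conv_lhs => whnf
              conv_rhs => whnf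
              rcases hd : c.isDigit with _ | _
              · simp only [hd]
                dsimp only [instDecidableEqBool, Bool.decEq]
                rw [if_neg (by simp : ¬(c = '_' ∧ false = true)), if_neg (by simp : ¬(c = '_' ∧ false = true))]
              · simp only [hd]
                dsimp only [instDecidableEqBool, Bool.decEq]
                generalize (0 * 10 + (c.toNat - '0'.toNat) : Nat) = a
                generalize htrue : (true : Bool) = b
                clear htrue hd
                induction t generalizing b a with
                | nil => cases b <;> rfl
                | cons d t ih =>
                  conv_lhs => whnf
                  conv_rhs => whnf
                  rcases hd2 : d.isDigit with _ | _
                  · simp only [hd2]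
                    dsimp only [instDecidableEqBool, Bool.decEq]
                    by_cases hu : d = '_' ∧ b = true
                    · rw [if_pos hu, if_pos hu]
                      cases t with
                      | nil => rfl
                      | cons e t2 =>
                        conv_lhs => whnf
                        conv_rhs => whnf
                        rcases he : e.isDigit with _ | _
                        · simp only [he]
                          dsimp only [instDecidableEqBool, Bool.decEq]
                        · simp only [he]
                          dsimp only [instDecidableEqBool, Bool.decEq]
                          exact ih _ _
                    · rw [if_neg hu, if_neg hu]
                  · simp only [hd2]
                    dsimp only [instDecidableEqBool, Bool.decEq]
                    exact ih _ _


-- ---- digits of Nat.toDigits ----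

theorem pv_digitChar_isDigit (m : Nat) (h : m < 10) : (Nat.digitChar m).isDigit = true := by
  interval_cases m <;> decide

theorem pv_digitChar_val (m : Nat) (h : m < 10) : (Nat.digitChar m).toNat - '0'.toNat = m := by
  interval_cases m <;> decide

theorem pv_toDigitsCore_append (fuel : Nat) : ∀ (n : Nat) (ds : List Char),
    Nat.toDigitsCore 10 fuel n ds = Nat.toDigitsCore 10 fuel n [] ++ ds := by
  induction fuel with
  | zero => intro n ds; simp [Nat.toDigitsCore]
  | succ fuel ih =>
    intro n ds
    simp only [Nat.toDigitsCore]
    by_cases h : n / 10 = 0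
    · simp [h]
    · simp only [if_neg h]
      rw [ih (n / 10) [Nat.digitChar (n % 10)], ih (n / 10) (Nat.digitChar (n % 10) :: ds)]
      simp

theorem pv_toDigitsCore_digits (fuel : Nat) : ∀ (n : Nat) (ds : List Char),
    (∀ c ∈ ds, c.isDigit = true) → ∀ c ∈ Nat.toDigitsCore 10 fuel n ds, c.isDigit = true := by
  induction fuel with
  | zero => intro n ds h; simpa [Nat.toDigitsCore] using h
  | succ fuel ih =>
    intro n ds h c hc
    simp only [Nat.toDigitsCore] at hc
    have hd : ∀ c ∈ Nat.digitChar (n % 10) :: ds, c.isDigit = true := by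
      intro c hc
      rcases List.mem_cons.mp hc with h1 | h1
      · subst h1; exact pv_digitChar_isDigit _ (Nat.mod_lt _ (by norm_num))
      · exact h c h1
    by_cases h0 : n / 10 = 0
    · rw [if_pos h0] at hc; exact hd c hc
    · rw [if_neg h0] at hc; exact ih (n / 10) _ hd c hc

theorem pv_toDigits_ne_nil (m : Nat) : Nat.toDigits 10 m ≠ [] := by
  show Nat.toDigitsCore 10 (m + 1) m [] ≠ []
  simp only [Nat.toDigitsCore]
  by_cases h0 : m / 10 = 0
  · simp [h0]
  · rw [if_neg h0, pv_toDigitsCore_append]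
    simp

theorem pv_toDigits_digits (m : Nat) : ∀ c ∈ Nat.toDigits 10 m, c.isDigit = true :=
  pv_toDigitsCore_digits (m + 1) m [] (by simp)

theorem pv_toDigitsCore_val (fuel : Nat) : ∀ (n a : Nat), n < fuel →
    List.foldl (fun acc c => acc * 10 + (c.toNat - '0'.toNat)) a (Nat.toDigitsCore 10 fuel n []) =
      a * 10 ^ (Nat.toDigitsCore 10 fuel n []).length + n := by
  induction fuel with
  | zero => omega
  | succ fuel ih =>
    intro n a hn
    simp only [Nat.toDigitsCore]
    by_cases h0 : n / 10 = 0
    · simp only [if_pos h0, List.foldl_cons, List.foldl_nil, List.length_cons, List.length_nil]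
      rw [pv_digitChar_val _ (Nat.mod_lt _ (by norm_num))]
      have : n % 10 = n := by omega
      rw [this]; ring
    · simp only [if_neg h0]
      rw [pv_toDigitsCore_append fuel (n / 10) [Nat.digitChar (n % 10)]]
      have hlt : n / 10 < fuel := by
        have := Nat.div_lt_self (by omega : 0 < n) (by norm_num : 1 < 10)
        omega
      rw [List.foldl_append, ih (n / 10) a hlt]
      simp only [List.foldl_cons, List.foldl_nil, List.length_append, List.length_cons,
        List.length_nil]
      rw [pv_digitChar_val _ (Nat.mod_lt _ (by norm_num))]
      have hnm : (a * 10 ^ (Nat.toDigitsCore 10 fuel (n / 10) []).length + n / 10) * 10 + n % 10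
          = a * (10 ^ (Nat.toDigitsCore 10 fuel (n / 10) []).length * 10) + (n / 10 * 10 + n % 10) := by
        ring
      have h2 : n / 10 * 10 + n % 10 = n := by omega
      rw [hnm, h2, pow_succ]

-- ---- my clone parses str(m) back to m ----

theorem pv_go_spec (l : List Char) : ∀ (b : Bool) (a : Nat),
    (∀ c ∈ l, c.isDigit = true) → (b = true ∨ l ≠ []) →
    pvDigitsGo l b a = some (List.foldl (fun acc c => acc * 10 + (c.toNat - '0'.toNat)) a l) := by
  induction l with
  | nil =>
    intro b a _ hb
    rcases hb with hb | hb
    · subst hb; simp [pvDigitsGo]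
    · exact absurd rfl hb
  | cons c t ih =>
    intro b a hdig _
    have hc : c.isDigit = true := hdig c (by simp)
    simp only [pvDigitsGo, if_pos hc, List.foldl_cons]
    exact ih true _ (fun d hd => hdig d (by simp [hd])) (Or.inl rfl)

theorem pv_digitsVal_toDigits (m : Nat) : pvDigitsVal? (Nat.toDigits 10 m) = some m := by
  have hne := pv_toDigits_ne_nil m
  have hdig := pv_toDigits_digits m
  have hval : List.foldl (fun acc c => acc * 10 + (c.toNat - '0'.toNat)) 0 (Nat.toDigits 10 m) = m := by
    show List.foldl _ 0 (Nat.toDigitsCore 10 (m + 1) m []) = m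
    rw [pv_toDigitsCore_val (m + 1) m 0 (by omega)]
    simp
  cases hl : Nat.toDigits 10 m with
  | nil => exact absurd hl hne
  | cons c t =>
    show pvDigitsGo (c :: t) false 0 = some m
    rw [pv_go_spec (c :: t) false 0 (by rw [← hl]; exact hdig) (Or.inr (by simp))]
    rw [← hl, hval]

-- non-space / non-sign facts about digit chars
theorem pv_isDigit_bounds (c : Char) (h : c.isDigit = true) : 48 ≤ c.toNat ∧ c.toNat ≤ 57 := by
  simp only [Char.isDigit, Bool.and_eq_true, decide_eq_true_eq] at h
  exact h

theorem pv_digit_not_space (c : Char) (h : c.isDigit = true) : PySem.Int.isIntSpace c = false := by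
  have hb := pv_isDigit_bounds c h
  unfold PySem.Int.isIntSpace
  simp only [Bool.or_eq_false_iff, decide_eq_false_iff_not]
  refine ⟨⟨⟨⟨⟨?_, ?_⟩, ?_⟩, ?_⟩, ?_⟩, ?_⟩ <;> (intro hx; subst hx; revert hb; decide)

theorem pv_dropWhile_nospace (l : List Char) (h : ∀ c ∈ l, PySem.Int.isIntSpace c = false) :
    List.dropWhile PySem.Int.isIntSpace l = l := by
  apply List.dropWhile_eq_self_iff.mpr
  intro hl
  simp [h _ (List.getElem_mem hl)]

theorem pv_strip_nospace (l : List Char) (h : ∀ c ∈ l, PySem.Int.isIntSpace c = false) :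
    (List.dropWhile PySem.Int.isIntSpace (List.dropWhile PySem.Int.isIntSpace l).reverse).reverse = l := by
  rw [pv_dropWhile_nospace l h, pv_dropWhile_nospace l.reverse (by intro c hc; exact h c (List.mem_reverse.mp hc)),
    List.reverse_reverse]

-- int(str(n)) = n
theorem pv_roundtrip (n : Int) : PySem.Int.ofChars? (PySem.Int.toChars n) = some n := by
  rw [pv_ofChars?_eq]
  unfold PySem.Int.toChars
  by_cases hn : n < 0
  · rw [if_pos hn]
    have hns : ∀ c ∈ '-' :: Nat.toDigits 10 n.natAbs, PySem.Int.isIntSpace c = false := by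
      intro c hc
      rcases List.mem_cons.mp hc with h1 | h1
      · subst h1; decide
      · exact pv_digit_not_space c (pv_toDigits_digits _ c h1)
    unfold pvOfChars?
    dsimp only
    rw [pv_strip_nospace _ hns]
    show Option.map _ _ = _
    rw [pv_digitsVal_toDigits]
    show some (-(n.natAbs : Int)) = some n
    have : (n.natAbs : Int) = -n := by omega
    rw [this, neg_neg]
  · rw [if_neg hn]
    have hdig := pv_toDigits_digits n.toNat
    have hns : ∀ c ∈ Nat.toDigits 10 n.toNat, PySem.Int.isIntSpace c = false :=
      fun c hc => pv_digit_not_space c (hdig c hc)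
    unfold pvOfChars?
    dsimp only
    rw [pv_strip_nospace _ hns]
    cases hl : Nat.toDigits 10 n.toNat with
    | nil => exact absurd hl (pv_toDigits_ne_nil _)
    | cons c t =>
      have hc : c.isDigit = true := hdig c (by rw [hl]; simp)
      have hcm : c ≠ '-' := by
        intro h; subst h; exact absurd hc (by decide)
      have hcp : c ≠ '+' := by
        intro h; subst h; exact absurd hc (by decide)
      split
      · rename_i ds heq
        exact absurd (List.cons.injEq _ _ _ _ ▸ heq : c = '-' ∧ t = ds).1 hcm
      · rename_i ds heq
        exact absurd (List.cons.injEq _ _ _ _ ▸ heq : c = '+' ∧ t = ds).1 hcp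
      · rw [← hl, pv_digitsVal_toDigits]
        show some ((n.toNat : Nat) : Int) = some n
        congr 1
        omega

-- ---- Chars.replace with a single char and empty replacement is a filter ----

theorem pv_replace_go (ch : Char) (fuel : Nat) : ∀ (l acc : List Char), l.length ≤ fuel →
    PySem.Chars.replace.go [ch] [] fuel l acc = acc.reverse ++ l.filter (fun x => !(x == ch)) := by
  induction fuel with
  | zero =>
    intro l acc h
    have hl : l = [] := by cases l <;> simp_all
    subst hl
    conv_lhs => whnf
    simp
  | succ fuel ih =>
    intro l acc h
    cases l with
    | nil =>
      conv_lhs => whnf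
      simp
    | cons c t =>
      conv_lhs => whnf
      rcases hpc : List.isPrefixOf [ch] (c :: t) with _ | _
      · simp only [hpc]
        dsimp only [instDecidableEqBool, Bool.decEq]
        rw [ih t (c :: acc) (by simpa using Nat.le_of_succ_le_succ (by simpa using h))]
        have hne : (c == ch) = false := by
          simp only [List.isPrefixOf, Bool.and_eq_false_iff] at hpc
          rcases hpc with h1 | h1
          · simpa [BEq.comm] using h1
          · simp [List.isPrefixOf] at h1
        simp [hne]
      · simp only [hpc]
        dsimp only [instDecidableEqBool, Bool.decEq]
        have heq : (c == ch) = true := by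
          simp only [List.isPrefixOf, Bool.and_eq_true] at hpc
          simpa [BEq.comm] using hpc.1
        have hdrop : List.drop (List.length [ch]) (c :: t) = t := by simp
        rw [hdrop]
        rw [ih t (List.reverse [] ++ acc) (by simpa using Nat.le_of_succ_le_succ (by simpa using h))]
        simp [heq]

theorem pv_replace_filter (s : List Char) (ch : Char) :
    PySem.Chars.replace s [ch] [] = s.filter (fun x => !(x == ch)) := by
  unfold PySem.Chars.replace
  rw [if_neg (by simp)]
  rw [pv_replace_go ch s.length s [] le_rfl]
  simp

def pvGood (c : Char) : Bool := !(c == '[' || c == ']' || c == '\'')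

theorem pv_replace3 (s : List Char) :
    PySem.Chars.replace (PySem.Chars.replace (PySem.Chars.replace s ['['] []) [']'] []) ['\''] []
      = s.filter pvGood := by
  rw [pv_replace_filter, pv_replace_filter, pv_replace_filter, List.filter_filter, List.filter_filter]
  apply List.filter_congr
  intro a _
  cases h1 : a == '[' <;> cases h2 : a == ']' <;> cases h3 : a == '\'' <;> simp [pvGood, h1, h2, h3]

theorem pv_filter_join (p : Char → Bool) (sep : List Char) (L : List (List Char)) :
    (PySem.Chars.join sep L).filter p = PySem.Chars.join (sep.filter p) (L.map (List.filter p)) := by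
  induction L with
  | nil => simp [PySem.Chars.join_nil]
  | cons x t ih =>
    cases t with
    | nil => simp [PySem.Chars.join_singleton]
    | cons y t2 =>
      rw [PySem.Chars.join_cons_cons, List.map_cons, List.map_cons,
        PySem.Chars.join_cons_cons, List.filter_append, List.filter_append]
      rw [List.map_cons] at ih
      rw [ih]

-- ---- the characters produced by str(n) survive the replaces ----

theorem pv_isDigit_good (c : Char) (h : c.isDigit = true) : pvGood c = true := by
  have h1 : (c == '[') = false := by
    rw [beq_eq_false_iff_ne]; intro e; subst e; exact absurd h (by decide)
  have h2 : (c == ']') = false := by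
    rw [beq_eq_false_iff_ne]; intro e; subst e; exact absurd h (by decide)
  have h3 : (c == '\'') = false := by
    rw [beq_eq_false_iff_ne]; intro e; subst e; exact absurd h (by decide)
  simp [pvGood, h1, h2, h3]

theorem pv_toChars_good (n : Int) : ∀ c ∈ PySem.Int.toChars n, pvGood c = true := by
  unfold PySem.Int.toChars
  by_cases hn : n < 0
  · rw [if_pos hn]
    intro c hc
    rcases List.mem_cons.mp hc with h | h
    · subst h; decide
    · exact pv_isDigit_good c (pv_toDigits_digits _ c h)
  · rw [if_neg hn]
    intro c hc
    exact pv_isDigit_good c (pv_toDigits_digits _ c hc)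

theorem pv_fmt_good (s p dw : Int) : ∀ c ∈ pvFmt s p dw, pvGood c = true := by
  intro c hc
  unfold pvFmt at hc
  rcases List.mem_append.mp hc with h | h
  · exact pv_toChars_good _ c h
  · rcases List.mem_cons.mp h with h1 | h1
    · subst h1; decide
    · exact pv_toChars_good _ c h1

theorem pv_filter_repr (s : List Char) (hs : ∀ c ∈ s, pvGood c = true) :
    (pvReprItem (.runStr s)).filter pvGood = s := by
  show List.filter pvGood ('[' :: '\'' :: (s ++ ['\'', ']'])) = s
  rw [List.filter_cons_of_neg (by decide), List.filter_cons_of_neg (by decide),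
    List.filter_append, List.filter_eq_self.mpr hs,
    show List.filter pvGood ['\'', ']'] = [] from by decide, List.append_nil]

-- ---- A's grouping loop computes the runs, kept as (start, last) pairs ----

def runLists : List Int → List Int → Int → List (List Int)
  | [], cur, _ => [cur]
  | i :: rest, cur, p => if i = p + 1 then runLists rest (cur ++ [i]) i else cur :: runLists rest [i] i

def runPairs : List Int → Int → Int → List (Int × Int)
  | [], s, p => [(s, p)]
  | i :: rest, s, p => if i = p + 1 then runPairs rest s i else (s, p) :: runPairs rest i i

theorem pv_appendRun (done : List (List Int)) (cur : List Int) (x : Int) :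
    pvAppendRun (done ++ [cur]) x = done ++ [cur ++ [x]] := by
  induction done with
  | nil => rfl
  | cons r rs ih =>
    cases rs with
    | nil => simp [pvAppendRun]
    | cons r2 rs2 => simp only [List.cons_append, pvAppendRun] at ih ⊢; rw [ih]

theorem pv_group_runLists (rest : List Int) : ∀ (p : Int) (done : List (List Int)) (cur : List Int),
    pvGroup rest (some (p + 1)) (done ++ [cur]) = done ++ runLists rest cur p := by
  induction rest with
  | nil => intro p done cur; rfl
  | cons i rest ih =>
    intro p done cur
    by_cases hip : i = p + 1
    · rw [pvGroup.eq_def]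
      simp only [runLists, if_pos hip]
      rw [if_pos (Or.inr (by rw [hip])), pv_appendRun]
      have : i + 1 = i + 1 := rfl
      subst hip
      exact ih (p + 1) done (cur ++ [p + 1])
    · rw [pvGroup.eq_def]
      simp only [runLists, if_neg hip]
      rw [if_neg (by simp [hip, eq_comm])]
      rw [show (done ++ [cur]) ++ [[i]] = (done ++ [cur]) ++ [[i]] from rfl]
      have hg := ih i (done ++ [cur]) [i]
      rw [show i = i + 1 - 1 from by ring] at hg ⊢
      simp only [sub_add_cancel] at hg ⊢
      rw [hg]
      simp

theorem pv_getLast_eq_getLastD (l : List Int) (h : l ≠ []) : l.getLast h = l.getLastD 0 := by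
  rw [List.getLastD_eq_getLast?, List.getLast?_eq_some_getLast h]
  rfl

theorem pv_group_start (x : Int) (rest : List Int) :
    pvGroup (x :: rest) none [[]] = runLists rest [x] x := by
  rw [pvGroup.eq_def]
  dsimp only
  rw [if_pos (Or.inl rfl)]
  have h1 : pvAppendRun [[]] x = [] ++ [[x]] := rfl
  rw [h1, pv_group_runLists rest x [] [x]]
  simp

theorem pv_formatRun_cons (x : Int) (rs : List Int) (dw : Int) :
    pvFormatRun (x :: rs) dw = .runStr (pvFmt x ((x :: rs).getLastD 0) dw) := by
  cases rs with
  | nil =>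
    unfold pvFormatRun
    rw [if_neg (by simp [PySem.List.len_eq]), if_pos (by simp [PySem.List.len_eq])]
    simp only [List.map_cons, List.map_nil, PySem.List.pop?_zero_cons]
    rw [pv_roundtrip (x + 1)]
    show PyFinalItem.runStr (PySem.Int.toChars (x + 1) ++ '-' :: PySem.Int.toChars (x + 1 - 1 + dw)) = _
    rw [show x + 1 - 1 + dw = x + dw from by ring]
    rfl
  | cons y ys =>
    unfold pvFormatRun
    rw [if_pos (by simp [PySem.List.len_eq]; try omega)]
    simp only [PySem.List.pop?_zero_cons]
    have hne : (y :: ys) ≠ [] := by simp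
    have hsplit : y :: ys = (y :: ys).dropLast ++ [(y :: ys).getLast hne] :=
      (List.dropLast_append_getLast hne).symm
    rw [show PySem.List.pop? (y :: ys) (-1)
        = PySem.List.pop? ((y :: ys).dropLast ++ [(y :: ys).getLast hne]) (-1) from by rw [← hsplit]]
    rw [show PySem.List.pop? ((y :: ys).dropLast ++ [(y :: ys).getLast hne]) (-1)
        = some ((y :: ys).getLast hne, (y :: ys).dropLast) from PySem.List.pop?_last _ _]
    show PyFinalItem.runStr (PySem.Int.toChars (x + 1) ++ '-' :: PySem.Int.toChars ((y :: ys).getLast hne + dw)) = _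
    rw [pv_getLast_eq_getLastD (y :: ys) hne]
    rfl

theorem pv_map_format (dw : Int) (rest : List Int) : ∀ (a : Int) (cs : List Int) (p : Int),
    (a :: cs).getLastD 0 = p →
    (runLists rest (a :: cs) p).map (fun items => pvFormatRun items dw)
      = (runPairs rest a p).map (fun q => PyFinalItem.runStr (pvFmt q.1 q.2 dw)) := by
  induction rest with
  | nil =>
    intro a cs p hp
    simp only [runLists, runPairs, List.map_cons, List.map_nil]
    rw [pv_formatRun_cons, hp]
  | cons i rest ih =>
    intro a cs p hp
    by_cases hip : i = p + 1
    · simp only [runLists, runPairs, if_pos hip]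
      have h2 : (a :: (cs ++ [i])).getLastD 0 = i := by
        rw [List.getLastD_eq_getLast?, ← List.cons_append, List.getLast?_concat]
        rfl
      have h3 := ih a (cs ++ [i]) i h2
      simpa using h3
    · simp only [runLists, runPairs, if_neg hip, List.map_cons]
      rw [pv_formatRun_cons, hp, ih i [] i (by simp)]

-- ---- B's fold computes the same run pairs ----

def pvStepB (dw : Int) : (Int × Int × List (List Char)) → Int → (Int × Int × List (List Char)) :=
  fun st index =>
    if index ≠ st.2.1 + 1 then (index, index, st.2.2 ++ [pvFmt st.1 st.2.1 dw])
    else (st.1, index, st.2.2)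

theorem pv_fold_runPairs (dw : Int) (rest : List Int) : ∀ (s p : Int) (parts : List (List Char)),
    (rest.foldl (pvStepB dw) (s, p, parts)).2.2
        ++ [pvFmt (rest.foldl (pvStepB dw) (s, p, parts)).1 (rest.foldl (pvStepB dw) (s, p, parts)).2.1 dw]
      = parts ++ (runPairs rest s p).map (fun q => pvFmt q.1 q.2 dw) := by
  induction rest with
  | nil => intro s p parts; simp [runPairs]
  | cons i rest ih =>
    intro s p parts
    rw [List.foldl_cons]
    by_cases hip : i = p + 1
    · rw [show pvStepB dw (s, p, parts) i = (s, i, parts) from by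
        simp [pvStepB, hip]]
      rw [ih s i parts]
      simp [runPairs, hip]
    · rw [show pvStepB dw (s, p, parts) i = (i, i, parts ++ [pvFmt s p dw]) from by
        simp [pvStepB, hip]]
      rw [ih i i (parts ++ [pvFmt s p dw])]
      simp [runPairs, hip]

theorem pv_alt_cons (x : Int) (rest : List Int) (dw : Int) :
    repeat_range_alt (x :: rest) dw
      = String.mk (PySem.Chars.join [',', ' ']
          ((rest.foldl (pvStepB dw) (x, x, [])).2.2
            ++ [pvFmt (rest.foldl (pvStepB dw) (x, x, [])).1 (rest.foldl (pvStepB dw) (x, x, [])).2.1 dw])) := rfl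

-- ===== VERDICT (by name: the statement is the Claim_ definition above) =====
theorem repeat_range_spec : Claim_equal_repeat_range := by
  unfold Claim_equal_repeat_range Spec_repeat_range
  intro ri dw _
  cases ri with
  | nil => rfl
  | cons x rest =>
    show repeat_range (x :: rest) dw = repeat_range_alt (x :: rest) dw
    unfold repeat_range
    rw [pv_alt_cons, pv_fold_runPairs dw rest x x []]
    simp only [pv_group_start]
    rw [pv_map_format dw rest x [] x (by simp)]
    rw [pv_replace3]
    rw [List.filter_cons_of_neg (by decide), List.filter_append, pv_filter_join]
    rw [show List.filter pvGood [']'] = [] from by decide, List.append_nil]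
    rw [show List.filter pvGood [',', ' '] = [',', ' '] from by decide]
    rw [List.map_map]
    have hmap : ((runPairs rest x x).map (fun q => PyFinalItem.runStr (pvFmt q.1 q.2 dw))).map
          (List.filter pvGood ∘ pvReprItem)
        = (runPairs rest x x).map (fun q => pvFmt q.1 q.2 dw) := by
      rw [List.map_map]
      apply List.map_congr_left
      intro q _
      show (pvReprItem (PyFinalItem.runStr (pvFmt q.1 q.2 dw))).filter pvGood = _
      exact pv_filter_repr _ (pv_fmt_good q.1 q.2 dw)
    rw [hmap]
    simp
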